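-- pv_equiv track=rewrite | github.com/Anipaleja/IgnitionHacks | src/comprehensive_training_processor.py | create_specialized_datasets
-- ===== SOURCE A (Python) =====
-- from typing import Dict, List, Tuple, Any, Set
--
-- def create_specialized_datasets(training_examples: List[Dict]) -> Dict[str, List[Dict]]:
--     """Create specialized datasets for different types of knowledge"""
--
--     specialized_datasets = {
--         'physical_knowledge': [],
--         'electrical_knowledge': [],
--         'programming_knowledge': [],
--         'wiring_knowledge': [],
--         'troubleshooting_knowledge': [],
--         'compatibility_knowledge': [],
--         'performance_knowledge': [],
--         'environmental_knowledge': [],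
--         'integration_knowledge': []
--     }
--
--     for example in training_examples:
--         category = example.get('category', 'general')
--
--         if category in ['physical']:
--             specialized_datasets['physical_knowledge'].append(example)
--         elif category in ['electrical', 'pins']:
--             specialized_datasets['electrical_knowledge'].append(example)
--         elif category in ['programming']:
--             specialized_datasets['programming_knowledge'].append(example)
--         elif category in ['wiring']:
--             specialized_datasets['wiring_knowledge'].append(example)
--         elif category in ['troubleshooting']:
--             specialized_datasets['troubleshooting_knowledge'].append(example)
--         elif category in ['compatibility']:
--             specialized_datasets['compatibility_knowledge'].append(example)
--         elif category in ['performance']: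
--             specialized_datasets['performance_knowledge'].append(example)
--         elif category in ['environmental']:
--             specialized_datasets['environmental_knowledge'].append(example)
--         elif category in ['integration']:
--             specialized_datasets['integration_knowledge'].append(example)
--
--     return specialized_datasets
-- ===== SOURCE B (Python) =====
-- def create_specialized_datasets(training_examples):
--     """Create specialized datasets for different types of knowledge"""
--     bucket_categories = [
--         ('physical_knowledge', {'physical'}),
--         ('electrical_knowledge', {'electrical', 'pins'}),
--         ('programming_knowledge', {'programming'}),
--         ('wiring_knowledge', {'wiring'}),
--         ('troubleshooting_knowledge', {'troubleshooting'}),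
--         ('compatibility_knowledge', {'compatibility'}),
--         ('performance_knowledge', {'performance'}),
--         ('environmental_knowledge', {'environmental'}),
--         ('integration_knowledge', {'integration'}),
--     ]
--     return {bucket: [ex for ex in training_examples
--                      if ex.get('category', 'general') in cats]
--             for bucket, cats in bucket_categories}
-- ===== Notes on version B (the rewrite author's own statement) =====
-- stated objective: simpler
-- what changed: Replaced the single-pass if/elif chain appending into a pre-built mutable dict by a declarative bucket->categories table and a dict-comprehension that builds each bucket with its own filtering scan of the input (one pass per bucket instead of one pass with a 9-way branch).
import Mathlib
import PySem

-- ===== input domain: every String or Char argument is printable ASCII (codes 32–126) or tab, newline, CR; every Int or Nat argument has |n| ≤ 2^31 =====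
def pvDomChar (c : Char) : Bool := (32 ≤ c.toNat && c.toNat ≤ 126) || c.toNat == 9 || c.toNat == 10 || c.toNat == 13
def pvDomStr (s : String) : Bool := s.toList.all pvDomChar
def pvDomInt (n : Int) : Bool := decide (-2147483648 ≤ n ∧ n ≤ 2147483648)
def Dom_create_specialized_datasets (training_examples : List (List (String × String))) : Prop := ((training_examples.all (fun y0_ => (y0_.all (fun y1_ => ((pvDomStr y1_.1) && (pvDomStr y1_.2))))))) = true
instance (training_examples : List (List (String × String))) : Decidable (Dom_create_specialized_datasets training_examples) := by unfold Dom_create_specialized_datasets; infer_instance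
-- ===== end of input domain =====

-- ===== PORT A =====
-- B changes: declarative bucket->categories table + one filtering scan per bucket (dict comprehension)
-- instead of A's single pass with a 9-way if/elif chain appending into a pre-built dict; objective: simpler.
def pvGetCat (ex : List (String × String)) : String :=
  PySem.Dict.getD (PySem.Dict.mk ex) "category" "general"

def pvStepA (d : PySem.Dict String (List (List (String × String)))) (ex : List (String × String)) :
    PySem.Dict String (List (List (String × String))) :=
  let category := pvGetCat ex
  if (["physical"] : List String).contains category then d.modify "physical_knowledge" [] (· ++ [ex])
  else if (["electrical", "pins"] : List String).contains category then d.modify "electrical_knowledge" [] (· ++ [ex])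
  else if (["programming"] : List String).contains category then d.modify "programming_knowledge" [] (· ++ [ex])
  else if (["wiring"] : List String).contains category then d.modify "wiring_knowledge" [] (· ++ [ex])
  else if (["troubleshooting"] : List String).contains category then d.modify "troubleshooting_knowledge" [] (· ++ [ex])
  else if (["compatibility"] : List String).contains category then d.modify "compatibility_knowledge" [] (· ++ [ex])
  else if (["performance"] : List String).contains category then d.modify "performance_knowledge" [] (· ++ [ex])
  else if (["environmental"] : List String).contains category then d.modify "environmental_knowledge" [] (· ++ [ex])
  else if (["integration"] : List String).contains category then d.modify "integration_knowledge" [] (· ++ [ex])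
  else d

def create_specialized_datasets (training_examples : List (List (String × String))) : List (String × List (List (String × String))) :=
  let specialized_datasets : PySem.Dict String (List (List (String × String))) := PySem.Dict.mk
    [("physical_knowledge", []), ("electrical_knowledge", []), ("programming_knowledge", []),
     ("wiring_knowledge", []), ("troubleshooting_knowledge", []), ("compatibility_knowledge", []),
     ("performance_knowledge", []), ("environmental_knowledge", []), ("integration_knowledge", [])]
  (training_examples.foldl pvStepA specialized_datasets).items

-- ===== PORT B =====
def pvBuckets : List (String × List String) :=
  [("physical_knowledge", ["physical"]),
   ("electrical_knowledge", ["electrical", "pins"]),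
   ("programming_knowledge", ["programming"]),
   ("wiring_knowledge", ["wiring"]),
   ("troubleshooting_knowledge", ["troubleshooting"]),
   ("compatibility_knowledge", ["compatibility"]),
   ("performance_knowledge", ["performance"]),
   ("environmental_knowledge", ["environmental"]),
   ("integration_knowledge", ["integration"])]

def create_specialized_datasets_alt (training_examples : List (List (String × String))) : List (String × List (List (String × String))) :=
  pvBuckets.map (fun bc => (bc.1, training_examples.filter (fun ex => bc.2.contains (pvGetCat ex))))

-- ===== PRECONDITION & SPEC =====

def Spec_create_specialized_datasets (training_examples : List (List (String × String))) (out : List (String × List (List (String × String)))) : Prop := out = create_specialized_datasets_alt training_examples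
instance (training_examples : List (List (String × String))) (out : List (String × List (List (String × String)))) : Decidable (Spec_create_specialized_datasets training_examples out) := by unfold Spec_create_specialized_datasets; infer_instance

-- ===== CLAIM (what is proved, stated in full; the proofs are below) =====
def Claim_equal_create_specialized_datasets : Prop := ∀ (training_examples : List (List (String × String))), Dom_create_specialized_datasets training_examples → Spec_create_specialized_datasets training_examples (create_specialized_datasets training_examples)

-- ===== LEMMAS AND PROOFS =====
lemma pv_loopA_items (xs : List (List (String × String)))
    (l1 l2 l3 l4 l5 l6 l7 l8 l9 : List (List (String × String))) :
    (xs.foldl pvStepA (PySem.Dict.mk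
      [("physical_knowledge", l1), ("electrical_knowledge", l2), ("programming_knowledge", l3),
       ("wiring_knowledge", l4), ("troubleshooting_knowledge", l5), ("compatibility_knowledge", l6),
       ("performance_knowledge", l7), ("environmental_knowledge", l8), ("integration_knowledge", l9)])).items
    = [("physical_knowledge", l1 ++ xs.filter (fun ex => (["physical"] : List String).contains (pvGetCat ex))),
       ("electrical_knowledge", l2 ++ xs.filter (fun ex => (["electrical", "pins"] : List String).contains (pvGetCat ex))),
       ("programming_knowledge", l3 ++ xs.filter (fun ex => (["programming"] : List String).contains (pvGetCat ex))),
       ("wiring_knowledge", l4 ++ xs.filter (fun ex => (["wiring"] : List String).contains (pvGetCat ex))),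
       ("troubleshooting_knowledge", l5 ++ xs.filter (fun ex => (["troubleshooting"] : List String).contains (pvGetCat ex))),
       ("compatibility_knowledge", l6 ++ xs.filter (fun ex => (["compatibility"] : List String).contains (pvGetCat ex))),
       ("performance_knowledge", l7 ++ xs.filter (fun ex => (["performance"] : List String).contains (pvGetCat ex))),
       ("environmental_knowledge", l8 ++ xs.filter (fun ex => (["environmental"] : List String).contains (pvGetCat ex))),
       ("integration_knowledge", l9 ++ xs.filter (fun ex => (["integration"] : List String).contains (pvGetCat ex)))] := by
  induction xs generalizing l1 l2 l3 l4 l5 l6 l7 l8 l9 with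
  | nil => simp
  | cons x xs ih =>
    by_cases h1 : (["physical"] : List String).contains (pvGetCat x)
    · simp only [List.contains_eq_mem, List.mem_cons, List.not_mem_nil, or_false, decide_eq_true_eq] at h1
      simp [List.foldl_cons, pvStepA, PySem.Dict.modify, PySem.Dict.contains, PySem.Dict.getD, PySem.Dict.get?, PySem.Dict.insert, ih, h1]
    by_cases h2 : (["electrical", "pins"] : List String).contains (pvGetCat x)
    · simp only [List.contains_eq_mem, List.mem_cons, List.not_mem_nil, or_false, decide_eq_true_eq] at h2
      rcases h2 with hc | hc <;>
        simp [List.foldl_cons, pvStepA, PySem.Dict.modify, PySem.Dict.contains, PySem.Dict.getD, PySem.Dict.get?, PySem.Dict.insert, ih, hc]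
    by_cases h3 : (["programming"] : List String).contains (pvGetCat x)
    · simp only [List.contains_eq_mem, List.mem_cons, List.not_mem_nil, or_false, decide_eq_true_eq] at h3
      simp [List.foldl_cons, pvStepA, PySem.Dict.modify, PySem.Dict.contains, PySem.Dict.getD, PySem.Dict.get?, PySem.Dict.insert, ih, h3]
    by_cases h4 : (["wiring"] : List String).contains (pvGetCat x)
    · simp only [List.contains_eq_mem, List.mem_cons, List.not_mem_nil, or_false, decide_eq_true_eq] at h4
      simp [List.foldl_cons, pvStepA, PySem.Dict.modify, PySem.Dict.contains, PySem.Dict.getD, PySem.Dict.get?, PySem.Dict.insert, ih, h4]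
    by_cases h5 : (["troubleshooting"] : List String).contains (pvGetCat x)
    · simp only [List.contains_eq_mem, List.mem_cons, List.not_mem_nil, or_false, decide_eq_true_eq] at h5
      simp [List.foldl_cons, pvStepA, PySem.Dict.modify, PySem.Dict.contains, PySem.Dict.getD, PySem.Dict.get?, PySem.Dict.insert, ih, h5]
    by_cases h6 : (["compatibility"] : List String).contains (pvGetCat x)
    · simp only [List.contains_eq_mem, List.mem_cons, List.not_mem_nil, or_false, decide_eq_true_eq] at h6
      simp [List.foldl_cons, pvStepA, PySem.Dict.modify, PySem.Dict.contains, PySem.Dict.getD, PySem.Dict.get?, PySem.Dict.insert, ih, h6]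
    by_cases h7 : (["performance"] : List String).contains (pvGetCat x)
    · simp only [List.contains_eq_mem, List.mem_cons, List.not_mem_nil, or_false, decide_eq_true_eq] at h7
      simp [List.foldl_cons, pvStepA, PySem.Dict.modify, PySem.Dict.contains, PySem.Dict.getD, PySem.Dict.get?, PySem.Dict.insert, ih, h7]
    by_cases h8 : (["environmental"] : List String).contains (pvGetCat x)
    · simp only [List.contains_eq_mem, List.mem_cons, List.not_mem_nil, or_false, decide_eq_true_eq] at h8
      simp [List.foldl_cons, pvStepA, PySem.Dict.modify, PySem.Dict.contains, PySem.Dict.getD, PySem.Dict.get?, PySem.Dict.insert, ih, h8]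
    by_cases h9 : (["integration"] : List String).contains (pvGetCat x)
    · simp only [List.contains_eq_mem, List.mem_cons, List.not_mem_nil, or_false, decide_eq_true_eq] at h9
      simp [List.foldl_cons, pvStepA, PySem.Dict.modify, PySem.Dict.contains, PySem.Dict.getD, PySem.Dict.get?, PySem.Dict.insert, ih, h9]
    · simp only [List.contains_eq_mem, List.mem_cons, List.not_mem_nil, or_false, decide_eq_true_eq, not_or] at h1 h2 h3 h4 h5 h6 h7 h8 h9
      simp [List.foldl_cons, pvStepA, ih, h1, h2.1, h2.2, h3, h4, h5, h6, h7, h8, h9]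

-- ===== VERDICT (by name: the statement is the Claim_ definition above) =====
theorem create_specialized_datasets_spec : Claim_equal_create_specialized_datasets := by
  intro xs _
  unfold Spec_create_specialized_datasets
  show create_specialized_datasets xs = create_specialized_datasets_alt xs
  simp only [create_specialized_datasets, pv_loopA_items, List.nil_append,
    create_specialized_datasets_alt, pvBuckets, List.map_cons, List.map_nil]
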